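-- pv_equiv track=rewrite | github.com/junhakjh/coding_test | programmers/lv3/sort/인사고과.py | solution
-- ===== SOURCE A (Python) =====
-- def solution(scores):
--     answer, my_a, my_b, my_sum = 1, scores[0][0], scores[0][1], sum(scores[0])
--     scores.sort(key=lambda x: x[1])
--     scores.sort(key=lambda x: x[0], reverse=True)
--
--     max_b = -1
--     for score in scores:
--         a, b = score
--         if a > my_a and b > my_b:
--             return -1
--         if b >= max_b:
--             max_b = b
--             if sum(score) > my_sum:
--                 answer += 1
--
--     return answer
-- ===== SOURCE B (Python) =====
-- def solution(scores):
--     # Same two in-place sorts as the original (the caller observes the mutation);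
--     # the answer itself is computed by a direct O(n^2) domination check instead of
--     # the running-max scan.
--     my_a, my_b = scores[0][0], scores[0][1]
--     my_sum = my_a + my_b
--     scores.sort(key=lambda x: x[1])
--     scores.sort(key=lambda x: x[0], reverse=True)
--     if any(ya > my_a and yb > my_b for ya, yb in scores):
--         return -1
--     answer = 1
--     for a, b in scores:
--         if a + b > my_sum and not any(ya > a and yb > b for ya, yb in scores):
--             answer += 1
--     return answer
-- ===== Notes on version B (the rewrite author's own statement) =====
-- stated objective: alternative
-- what changed: The running-max_b single scan over the (a desc, b asc)-sorted list is replaced by a direct quadratic check: an employee counts iff its sum beats mine and no other employee strictly dominates it in both scores; the two in-place sorts are kept so the caller-visible mutation of `scores` is identical.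
-- intended difference: On inputs where nobody strictly dominates employee 0 but some employee has second score < -1, a sum above employee 0's and no strict dominator, A's max_b = -1 initialisation silently skips that employee and undercounts, while B counts it, which is the intended 'no dominator' rule. — e.g. on solution([[0, 0], [5, -2]]): A returns 1, B returns 2
-- outside the precondition, e.g. on solution([[0, 0], [2, 2], [1, 1, 1]]): A returns -1, B returns -1
import Mathlib
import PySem

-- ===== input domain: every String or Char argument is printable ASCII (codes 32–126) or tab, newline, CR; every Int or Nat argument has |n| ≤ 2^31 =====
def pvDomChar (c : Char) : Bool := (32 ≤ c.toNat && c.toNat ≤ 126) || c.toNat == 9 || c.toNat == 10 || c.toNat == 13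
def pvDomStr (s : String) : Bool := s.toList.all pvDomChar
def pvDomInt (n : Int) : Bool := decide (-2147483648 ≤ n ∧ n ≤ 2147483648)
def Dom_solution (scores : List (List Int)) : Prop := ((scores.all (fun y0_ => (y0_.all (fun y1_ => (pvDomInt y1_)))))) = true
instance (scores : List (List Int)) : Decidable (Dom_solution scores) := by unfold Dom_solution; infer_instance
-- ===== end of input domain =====

-- B replaces A's running-max_b scan over the (a desc, b asc)-sorted list by a direct O(n^2)
-- strict-domination check, keeping A's two sorts (so the in-place mutation of `scores` is the
-- same); on inputs holding an undominated row with second score < -1 and sum above row 0's,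
-- A's max_b = -1 initialisation undercounts and B returns the intended count (see D_solution).

-- ===== PORT A =====
-- sort keys `lambda x: x[1]` / `lambda x: x[0]` (x[i] raises on short rows — outside Pre_;
-- pyGetD's default 0 is only reached there)
def pvKA (s : List Int) : Int := PySem.List.pyGetD s 0 0
def pvKB (s : List Int) : Int := PySem.List.pyGetD s 1 0

-- the `for score in scores` loop: state (answer, max_b), early `return -1`
def pvLoopA (my_a my_b my_sum : Int) : List (List Int) → Int → Int → Int
  | [], answer, _ => answer
  | score :: rest, answer, max_b =>
    match score with
    | [a, b] =>
      if a > my_a ∧ b > my_b then -1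
      else if b ≥ max_b then
        pvLoopA my_a my_b my_sum rest (if a + b > my_sum then answer + 1 else answer) b
      else pvLoopA my_a my_b my_sum rest answer max_b
    | _ => 0  -- `a, b = score` raises ValueError here (outside Pre_)

def solution (scores : List (List Int)) : Int :=
  match scores with
  | [] => 0  -- scores[0] raises IndexError (outside Pre_)
  | s0 :: _ =>
    match s0 with
    | [my_a, my_b] =>
      -- my_sum = sum(scores[0]) = my_a + my_b; then the two stable sorts, then the scan
      pvLoopA my_a my_b (my_a + my_b)
        (PySem.List.sorted (PySem.List.sorted scores pvKB) pvKA true) 1 (-1)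
    | _ => 0  -- scores[0][0] / scores[0][1] / row unpack raises (outside Pre_)

-- ===== PORT B =====
-- any(ya > a and yb > b for ya, yb in l2)  (unpack raises on short rows — outside Pre_)
def pvAnyBeats (l2 : List (List Int)) (a b : Int) : Bool :=
  l2.any (fun y => match y with
    | [ya, yb] => decide (ya > a) && decide (yb > b)
    | _ => false)

def solution_alt (scores : List (List Int)) : Int :=
  match scores with
  | [] => 0  -- scores[0] raises IndexError (outside Pre_)
  | s0 :: _ =>
    match s0 with
    | [my_a, my_b] =>
      let l2 := PySem.List.sorted (PySem.List.sorted scores pvKB) pvKA true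
      if pvAnyBeats l2 my_a my_b then -1
      else
        l2.foldl (fun answer s =>
          match s with
          | [a, b] =>
            if a + b > my_a + my_b ∧ pvAnyBeats l2 a b = false then answer + 1 else answer
          | _ => answer) 1  -- unpack raises here (outside Pre_)
    | _ => 0

-- ===== PRECONDITION & SPEC =====
-- Pre_ excludes empty scores and rows of length ≠ 2, on which A normally raises
-- IndexError/ValueError; when a strictly dominating row sorts before the malformed one,
-- A happens to return -1 first (and B returns -1 there too — see the cite).
def Pre_solution (scores : List (List Int)) : Prop :=
  scores ≠ [] ∧ ∀ s ∈ scores, s.length = 2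
instance (scores : List (List Int)) : Decidable (Pre_solution scores) := by
  unfold Pre_solution; infer_instance
def pvWitness_solution : List (List Int) := [[1, 1], [3, 2]]

-- On inputs where no row strictly dominates row 0 but some row has second score < -1, a sum
-- above row 0's and no strict dominator, A's max_b = -1 initialisation silently skips that row
-- and undercounts, while B counts it — the intended 'no strictly-dominant rank' rule.
def pvBeats (l : List (List Int)) (s : List Int) : Bool :=
  l.any fun y => decide (y.headD 0 > s.headD 0) && decide (y.getD 1 0 > s.getD 1 0)

def D_solution (scores : List (List Int)) : Prop :=
  pvBeats scores (scores.headD []) = false ∧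
  ∃ s ∈ scores, s.getD 1 0 < -1 ∧ s.sum > (scores.headD []).sum ∧ pvBeats scores s = false

instance (scores : List (List Int)) : Decidable (D_solution scores) := by
  unfold D_solution; infer_instance

def Spec_solution (scores : List (List Int)) (out : Int) : Prop :=
  ¬ D_solution scores → out = solution_alt scores
instance (scores : List (List Int)) (out : Int) : Decidable (Spec_solution scores out) := by
  unfold Spec_solution; infer_instance

def pvDiffWitness_solution : List (List Int) := [[0, 0], [5, -2]]
def pvDiffWitnessOut_solution : Int × Int := (1, 2)

-- ===== CLAIM (what is proved, stated in full; the proofs are below) =====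
def Claim_unchanged_solution : Prop :=
  ∀ (scores : List (List Int)), Dom_solution scores → Pre_solution scores →
    Spec_solution scores (solution scores)
def Claim_changed_solution : Prop :=
  Dom_solution (pvDiffWitness_solution) ∧ Pre_solution (pvDiffWitness_solution) ∧
  D_solution (pvDiffWitness_solution) ∧
  solution (pvDiffWitness_solution) = pvDiffWitnessOut_solution.1 ∧
  solution_alt (pvDiffWitness_solution) = pvDiffWitnessOut_solution.2 ∧
  pvDiffWitnessOut_solution.1 ≠ pvDiffWitnessOut_solution.2
def Claim_exact_solution : Prop :=
  ∀ (scores : List (List Int)), Dom_solution scores → Pre_solution scores →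
    D_solution scores → solution scores ≠ solution_alt scores

-- ===== LEMMAS AND PROOFS =====

def pvR (s t : List Int) : Prop := pvKA t < pvKA s ∨ (pvKA s = pvKA t ∧ pvKB s ≤ pvKB t)

lemma pvR_le {s t : List Int} (h : pvR s t) : pvKA t ≤ pvKA s := by
  rcases h with h | ⟨h, _⟩ <;> omega

lemma pv_insertBy_pairwise (x : List Int) :
    ∀ ys : List (List Int), ys.Pairwise pvR →
      (∀ y ∈ ys, pvKA y = pvKA x → pvKB y ≤ pvKB x) →
      (PySem.List.insertBy (fun a b => decide (pvKA b < pvKA a)) x ys).Pairwise pvR := by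
  intro ys
  induction ys with
  | nil => intro _ _; simp [PySem.List.insertBy]
  | cons y t ih =>
    intro hp hx
    rw [List.pairwise_cons] at hp
    obtain ⟨hyt, hpt⟩ := hp
    by_cases hb : pvKA y < pvKA x
    · rw [show PySem.List.insertBy (fun a b => decide (pvKA b < pvKA a)) x (y :: t)
          = x :: y :: t by simp [PySem.List.insertBy, hb]]
      refine List.Pairwise.cons ?_ (List.Pairwise.cons hyt hpt)
      intro z hz
      rcases List.mem_cons.mp hz with rfl | hz
      · exact Or.inl hb
      · exact Or.inl (lt_of_le_of_lt (pvR_le (hyt z hz)) hb)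
    · rw [show PySem.List.insertBy (fun a b => decide (pvKA b < pvKA a)) x (y :: t)
          = y :: PySem.List.insertBy (fun a b => decide (pvKA b < pvKA a)) x t by
            simp [PySem.List.insertBy, hb]]
      refine List.Pairwise.cons ?_ (ih hpt (fun z hz h => hx z (List.mem_cons_of_mem _ hz) h))
      intro z hz
      rcases (PySem.List.mem_insertBy _ _ _ _).mp hz with rfl | hz
      · rcases lt_or_eq_of_le (not_lt.mp hb) with h | h
        · exact Or.inl h
        · exact Or.inr ⟨h.symm, hx y (List.mem_cons_self) h.symm⟩
      · exact hyt z hz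

lemma pv_foldl_insertBy_pairwise :
    ∀ (xs acc : List (List Int)), xs.Pairwise (fun s t => pvKB s ≤ pvKB t) →
      acc.Pairwise pvR → (∀ y ∈ acc, ∀ x ∈ xs, pvKB y ≤ pvKB x) →
      (xs.foldl (fun acc x => PySem.List.insertBy (fun a b => decide (pvKA b < pvKA a)) x acc) acc).Pairwise pvR := by
  intro xs
  induction xs with
  | nil => intro acc _ h _; simpa using h
  | cons x t ih =>
    intro acc hxs hacc hcross
    rw [List.pairwise_cons] at hxs
    simp only [List.foldl_cons]
    refine ih _ hxs.2 ?_ ?_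
    · exact pv_insertBy_pairwise x acc hacc (fun y hy _ => hcross y hy x List.mem_cons_self)
    · intro y hy z hz
      rcases (PySem.List.mem_insertBy _ _ _ _).mp hy with rfl | hy
      · exact hxs.1 z hz
      · exact hcross y hy z (List.mem_cons_of_mem _ hz)

lemma pv_sorted_pairwise (scores : List (List Int)) :
    (PySem.List.sorted (PySem.List.sorted scores pvKB) pvKA true).Pairwise pvR := by
  rw [PySem.List.sorted_rev_eq_foldl_insertBy]
  exact pv_foldl_insertBy_pairwise _ [] (PySem.List.sorted_pairwise scores pvKB)
    List.Pairwise.nil (by simp)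

lemma pvKA_pair (a b : Int) (t : List Int) : pvKA (a :: b :: t) = a := by simp [pvKA, pysem]

lemma pvKB_pair (a b : Int) (t : List Int) : pvKB (a :: b :: t) = b := by simp [pvKB, pysem]

lemma pv_len2 {s : List Int} (h : s.length = 2) : ∃ a b : Int, s = [a, b] := by
  match s, h with
  | [a, b], _ => exact ⟨a, b, rfl⟩

lemma pv_loopA_neg (my_a my_b my_sum : Int) :
    ∀ (L : List (List Int)) (ans m : Int), (∀ s ∈ L, s.length = 2) →
      (∃ s ∈ L, pvKA s > my_a ∧ pvKB s > my_b) →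
      pvLoopA my_a my_b my_sum L ans m = -1 := by
  intro L
  induction L with
  | nil => intro ans m _ h; simp at h
  | cons x r ih =>
    intro ans m hsh hex
    obtain ⟨a, b, rfl⟩ := pv_len2 (hsh x List.mem_cons_self)
    by_cases hd : a > my_a ∧ b > my_b
    · simp [pvLoopA, hd]
    · have hex' : ∃ s ∈ r, pvKA s > my_a ∧ pvKB s > my_b := by
        rcases hex with ⟨s, hs, h1, h2⟩
        rcases List.mem_cons.mp hs with rfl | hs
        · exact absurd ⟨by simpa [pvKA_pair] using h1, by simpa [pvKB_pair] using h2⟩ hd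
        · exact ⟨s, hs, h1, h2⟩
      have hsh' : ∀ s ∈ r, s.length = 2 := fun s hs => hsh s (List.mem_cons_of_mem _ hs)
      by_cases hb : b ≥ m
      · simp only [pvLoopA, hd, if_false, hb]
        exact ih _ _ hsh' hex'
      · simp only [pvLoopA, hd, if_false, hb]
        exact ih _ _ hsh' hex'

def pvUndom (l2 : List (List Int)) (s : List Int) : Bool :=
  !(l2.any (fun y => decide (pvKA y > pvKA s) && decide (pvKB y > pvKB s)))

lemma pv_loopA_count (my_a my_b my_sum : Int) :
    ∀ (L : List (List Int)) (ans m : Int), (∀ s ∈ L, s.length = 2) → L.Pairwise pvR →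
      (¬ ∃ s ∈ L, pvKA s > my_a ∧ pvKB s > my_b) →
      pvLoopA my_a my_b my_sum L ans m =
        ans + (L.countP (fun s =>
          decide (pvKA s + pvKB s > my_sum) && decide (m ≤ pvKB s) && pvUndom L s) : Int) := by
  intro L
  induction L with
  | nil => intro ans m _ _ _; simp [pvLoopA]
  | cons x r ih =>
    intro ans m hsh hp hnex
    obtain ⟨a, b, rfl⟩ := pv_len2 (hsh x List.mem_cons_self)
    rw [List.pairwise_cons] at hp
    have hd : ¬ (a > my_a ∧ b > my_b) := by
      intro h
      exact hnex ⟨[a, b], List.mem_cons_self, by simpa [pvKA_pair, pvKB_pair] using h⟩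
    have hnex' : ¬ ∃ s ∈ r, pvKA s > my_a ∧ pvKB s > my_b := by
      intro ⟨s, hs, h⟩; exact hnex ⟨s, List.mem_cons_of_mem _ hs, h⟩
    have hsh' : ∀ s ∈ r, s.length = 2 := fun s hs => hsh s (List.mem_cons_of_mem _ hs)
    -- the head is never dominated inside x :: r
    have hundomx : pvUndom ([a, b] :: r) [a, b] = true := by
      simp only [pvUndom, Bool.not_eq_eq_eq_not, Bool.not_true, List.any_eq_false]
      intro y hy hcontra
      simp only [Bool.and_eq_true, decide_eq_true_eq] at hcontra
      rcases List.mem_cons.mp hy with rfl | hy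
      · omega
      · have := pvR_le (hp.1 y hy); omega
    by_cases hb : b ≥ m
    · simp only [pvLoopA, hd, if_false, if_pos hb]
      rw [ih _ _ hsh' hp.2 hnex']
      rw [List.countP_cons]
      have hcongr : r.countP (fun s =>
            decide (pvKA s + pvKB s > my_sum) && decide (b ≤ pvKB s) && pvUndom r s)
          = r.countP (fun s =>
            decide (pvKA s + pvKB s > my_sum) && decide (m ≤ pvKB s) && pvUndom ([a,b] :: r) s) := by
        apply List.countP_congr
        intro s hs
        have hRxs := hp.1 s hs
        have hax : pvUndom ([a,b] :: r) s = (pvUndom r s && !(decide (pvKA [a,b] > pvKA s) && decide (pvKB [a,b] > pvKB s))) := by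
          simp only [pvUndom, List.any_cons, Bool.not_or]
          rw [Bool.and_comm]
        constructor
        · intro h
          simp only [Bool.and_eq_true, decide_eq_true_eq] at h ⊢
          obtain ⟨⟨h1, h2⟩, h3⟩ := h
          refine ⟨⟨h1, by omega⟩, ?_⟩
          rw [hax]
          simp only [Bool.and_eq_true, h3, true_and, Bool.not_eq_eq_eq_not, Bool.not_true,
            Bool.and_eq_false_iff, decide_eq_false_iff_not, not_lt, pvKA_pair, pvKB_pair]
          right; omega
        · intro h
          simp only [Bool.and_eq_true, decide_eq_true_eq] at h ⊢
          obtain ⟨⟨h1, h2⟩, h3⟩ := h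
          rw [hax] at h3
          simp only [Bool.and_eq_true, Bool.not_eq_eq_eq_not, Bool.not_true,
            Bool.and_eq_false_iff, decide_eq_false_iff_not, not_lt, pvKA_pair, pvKB_pair] at h3
          obtain ⟨h3, h4⟩ := h3
          refine ⟨⟨h1, ?_⟩, h3⟩
          -- need b ≤ pvKB s : from pvR [a,b] s and h4
          rcases hRxs with hlt | ⟨heq, hle⟩
          · rw [pvKA_pair] at hlt
            rcases h4 with h4 | h4 <;> omega
          · rw [pvKB_pair] at hle; exact hle
      rw [hcongr]
      have hx : (decide (pvKA [a,b] + pvKB [a,b] > my_sum) && decide (m ≤ pvKB [a,b]) && pvUndom ([a,b] :: r) [a,b])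
          = decide (a + b > my_sum) := by
        simp [pvKA_pair, pvKB_pair, hundomx, hb]
      rw [hx]
      by_cases hsum : a + b > my_sum
      · simp [hsum]; ring
      · simp [hsum]
    · simp only [pvLoopA, hd, if_false, if_neg hb]
      rw [ih _ _ hsh' hp.2 hnex']
      rw [List.countP_cons]
      have hx : (decide (pvKA [a,b] + pvKB [a,b] > my_sum) && decide (m ≤ pvKB [a,b]) && pvUndom ([a,b] :: r) [a,b]) = false := by
        simp only [pvKB_pair, Bool.and_eq_false_iff]
        left; right; simpa using hb
      rw [hx]
      have hcongr : r.countP (fun s =>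
            decide (pvKA s + pvKB s > my_sum) && decide (m ≤ pvKB s) && pvUndom r s)
          = r.countP (fun s =>
            decide (pvKA s + pvKB s > my_sum) && decide (m ≤ pvKB s) && pvUndom ([a,b] :: r) s) := by
        apply List.countP_congr
        intro s hs
        have hax : pvUndom ([a,b] :: r) s = (pvUndom r s && !(decide (pvKA [a,b] > pvKA s) && decide (pvKB [a,b] > pvKB s))) := by
          simp only [pvUndom, List.any_cons, Bool.not_or]
          rw [Bool.and_comm]
        constructor
        · intro h
          simp only [Bool.and_eq_true, decide_eq_true_eq] at h ⊢
          obtain ⟨⟨h1, h2⟩, h3⟩ := h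
          refine ⟨⟨h1, h2⟩, ?_⟩
          rw [hax]
          simp only [Bool.and_eq_true, h3, true_and, Bool.not_eq_eq_eq_not, Bool.not_true,
            Bool.and_eq_false_iff, decide_eq_false_iff_not, not_lt, pvKA_pair, pvKB_pair]
          right; omega
        · intro h
          simp only [Bool.and_eq_true, decide_eq_true_eq] at h ⊢
          obtain ⟨⟨h1, h2⟩, h3⟩ := h
          rw [hax] at h3
          simp only [Bool.and_eq_true] at h3
          exact ⟨⟨h1, h2⟩, h3.1⟩
      rw [hcongr]
      simp

lemma pv_anyBeats_eq (l2 : List (List Int)) (hl2 : ∀ s ∈ l2, s.length = 2) (a b : Int) :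
    pvAnyBeats l2 a b = l2.any (fun y => decide (pvKA y > a) && decide (pvKB y > b)) := by
  induction l2 with
  | nil => rfl
  | cons y t ih =>
    obtain ⟨ya, yb, rfl⟩ := pv_len2 (hl2 y List.mem_cons_self)
    rw [show pvAnyBeats ([ya, yb] :: t) a b
        = ((decide (ya > a) && decide (yb > b)) || pvAnyBeats t a b) from rfl]
    rw [List.any_cons, ih (fun s hs => hl2 s (List.mem_cons_of_mem _ hs))]
    rw [pvKA_pair, pvKB_pair]

lemma pv_anyBeats_iff (l2 : List (List Int)) (hl2 : ∀ s ∈ l2, s.length = 2) (a b : Int) :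
    pvAnyBeats l2 a b = true ↔ ∃ s ∈ l2, pvKA s > a ∧ pvKB s > b := by
  rw [pv_anyBeats_eq l2 hl2]
  simp

lemma pv_foldlB (my_a my_b : Int) (l2 : List (List Int)) (hl2 : ∀ s ∈ l2, s.length = 2) :
    ∀ (L : List (List Int)) (ans : Int), (∀ s ∈ L, s.length = 2) →
      L.foldl (fun answer s =>
          match s with
          | [a, b] =>
            if a + b > my_a + my_b ∧ pvAnyBeats l2 a b = false then answer + 1 else answer
          | _ => answer) ans
      = ans + (L.countP (fun s =>
          decide (pvKA s + pvKB s > my_a + my_b) && pvUndom l2 s) : Int) := by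
  intro L
  induction L with
  | nil => intro ans _; simp
  | cons x r ih =>
    intro ans hsh
    obtain ⟨a, b, rfl⟩ := pv_len2 (hsh x List.mem_cons_self)
    have hsh' : ∀ s ∈ r, s.length = 2 := fun s hs => hsh s (List.mem_cons_of_mem _ hs)
    rw [List.foldl_cons, List.countP_cons]
    rw [show (match ([a, b] : List Int) with
        | [a, b] => if a + b > my_a + my_b ∧ pvAnyBeats l2 a b = false then ans + 1 else ans
        | _ => ans)
        = if a + b > my_a + my_b ∧ pvAnyBeats l2 a b = false then ans + 1 else ans from rfl]
    have hu : pvUndom l2 [a, b] = !(pvAnyBeats l2 a b) := by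
      rw [pv_anyBeats_eq l2 hl2]
      simp [pvUndom, pvKA_pair, pvKB_pair]
    by_cases hc : a + b > my_a + my_b ∧ pvAnyBeats l2 a b = false
    · rw [if_pos hc, ih _ hsh']
      rw [show (decide (pvKA [a,b] + pvKB [a,b] > my_a + my_b) && pvUndom l2 [a,b]) = true by
        rw [hu, hc.2]; simp [pvKA_pair, pvKB_pair, hc.1]]
      simp
      omega
    · rw [if_neg hc, ih _ hsh']
      rw [show (decide (pvKA [a,b] + pvKB [a,b] > my_a + my_b) && pvUndom l2 [a,b]) = false by
        rw [hu]
        simp only [pvKA_pair, pvKB_pair]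
        rcases not_and_or.mp hc with h | h
        · simp [h]
        · cases hx : pvAnyBeats l2 a b
          · exact absurd hx h
          · simp]
      simp

lemma pv_countP_lt {α : Type} (p q : α → Bool) :
    ∀ (l : List α), (∀ x ∈ l, p x = true → q x = true) →
      ∀ x ∈ l, p x = false → q x = true → l.countP p < l.countP q := by
  intro l
  induction l with
  | nil => intro _ x hx; simp at hx
  | cons y t ih =>
    intro h x hx hpx hqx
    have hmono : t.countP p ≤ t.countP q :=
      List.countP_mono_left (fun z hz => h z (List.mem_cons_of_mem _ hz))
    rw [List.countP_cons, List.countP_cons]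
    rcases List.mem_cons.mp hx with rfl | hx
    · rw [hpx, hqx]; simpa using Nat.lt_succ_of_le hmono
    · have := ih (fun z hz => h z (List.mem_cons_of_mem _ hz)) x hx hpx hqx
      have hyq : (if p y = true then 1 else 0) ≤ (if q y = true then 1 else 0) := by
        by_cases hy : p y = true
        · rw [hy, h y List.mem_cons_self hy]
        · simp [hy]
      omega

lemma pvUndom_iff (l : List (List Int)) (s : List Int) :
    pvUndom l s = true ↔ ¬ ∃ y ∈ l, pvKA y > pvKA s ∧ pvKB y > pvKB s := by
  simp [pvUndom]

-- main agreement argument, shared by solution_spec and solution_tight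

lemma pv_main (ma mb : Int) (rest : List (List Int))
    (hlen : ∀ s ∈ ([ma, mb] :: rest), s.length = 2)
    (hnd : ¬ ∃ s ∈ ([ma, mb] :: rest), pvKA s > ma ∧ pvKB s > mb) :
    solution ([ma, mb] :: rest) =
      1 + ((PySem.List.sorted (PySem.List.sorted ([ma, mb] :: rest) pvKB) pvKA true).countP
        (fun s => decide (pvKA s + pvKB s > ma + mb) && decide ((-1 : Int) ≤ pvKB s)
          && pvUndom (PySem.List.sorted (PySem.List.sorted ([ma, mb] :: rest) pvKB) pvKA true) s) : Int)
    ∧ solution_alt ([ma, mb] :: rest) =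
      1 + ((PySem.List.sorted (PySem.List.sorted ([ma, mb] :: rest) pvKB) pvKA true).countP
        (fun s => decide (pvKA s + pvKB s > ma + mb)
          && pvUndom (PySem.List.sorted (PySem.List.sorted ([ma, mb] :: rest) pvKB) pvKA true) s) : Int) := by
  set L := PySem.List.sorted (PySem.List.sorted ([ma, mb] :: rest) pvKB) pvKA true with hL
  have hLmem : ∀ s, s ∈ L ↔ s ∈ ([ma, mb] :: rest) := by
    intro s; rw [hL, PySem.List.mem_sorted, PySem.List.mem_sorted]
  have hLsh : ∀ s ∈ L, s.length = 2 := fun s hs => hlen s ((hLmem s).mp hs)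
  have hndL : ¬ ∃ s ∈ L, pvKA s > ma ∧ pvKB s > mb := by
    intro ⟨s, hs, h⟩; exact hnd ⟨s, (hLmem s).mp hs, h⟩
  constructor
  · show pvLoopA ma mb (ma + mb) L 1 (-1) = _
    rw [pv_loopA_count ma mb (ma + mb) L 1 (-1) hLsh (by rw [hL]; exact pv_sorted_pairwise _) hndL]
  · show (if pvAnyBeats L ma mb then -1 else _) = _
    have hdb : pvAnyBeats L ma mb = false := by
      rw [← Bool.not_eq_true]
      intro h
      exact hndL ((pv_anyBeats_iff L hLsh ma mb).mp h)
    rw [if_neg (by rw [hdb]; exact Bool.false_ne_true)]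
    exact pv_foldlB ma mb L hLsh L 1 hLsh

lemma pv_neg (ma mb : Int) (rest : List (List Int))
    (hlen : ∀ s ∈ ([ma, mb] :: rest), s.length = 2)
    (hd : ∃ s ∈ ([ma, mb] :: rest), pvKA s > ma ∧ pvKB s > mb) :
    solution ([ma, mb] :: rest) = -1 ∧ solution_alt ([ma, mb] :: rest) = -1 := by
  set L := PySem.List.sorted (PySem.List.sorted ([ma, mb] :: rest) pvKB) pvKA true with hL
  have hLmem : ∀ s, s ∈ L ↔ s ∈ ([ma, mb] :: rest) := by
    intro s; rw [hL, PySem.List.mem_sorted, PySem.List.mem_sorted]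
  have hLsh : ∀ s ∈ L, s.length = 2 := fun s hs => hlen s ((hLmem s).mp hs)
  have hdL : ∃ s ∈ L, pvKA s > ma ∧ pvKB s > mb := by
    obtain ⟨s, hs, h⟩ := hd; exact ⟨s, (hLmem s).mpr hs, h⟩
  constructor
  · show pvLoopA ma mb (ma + mb) L 1 (-1) = -1
    exact pv_loopA_neg ma mb (ma + mb) L 1 (-1) hLsh hdL
  · show (if pvAnyBeats L ma mb then -1 else _) = -1
    rw [if_pos ((pv_anyBeats_iff L hLsh ma mb).mpr hdL)]

lemma pv_getD1 (a b : Int) : List.getD [a, b] 1 0 = b := rfl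

lemma pv_beats_iff (l : List (List Int)) (hl : ∀ t ∈ l, t.length = 2) (s : List Int)
    (hs : s.length = 2) :
    pvBeats l s = false ↔ ¬ ∃ y ∈ l, pvKA y > pvKA s ∧ pvKB y > pvKB s := by
  obtain ⟨a, b, rfl⟩ := pv_len2 hs
  rw [show pvBeats l [a, b]
      = l.any (fun y => decide (y.headD 0 > a) && decide (y.getD 1 0 > b)) from rfl]
  simp only [pvKA_pair, pvKB_pair]
  constructor
  · intro h ⟨y, hy, h1, h2⟩
    obtain ⟨ya, yb, rfl⟩ := pv_len2 (hl y hy)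
    rw [List.any_eq_false] at h
    have := h _ hy
    rw [pvKA_pair] at h1
    rw [pvKB_pair] at h2
    simp [h1, h2] at this
  · intro h
    rw [List.any_eq_false]
    intro y hy hc
    obtain ⟨ya, yb, rfl⟩ := pv_len2 (hl y hy)
    simp only [pv_getD1, List.headD_cons, Bool.and_eq_true, decide_eq_true_eq] at hc
    exact h ⟨[ya, yb], hy, by rw [pvKA_pair]; exact hc.1, by rw [pvKB_pair]; exact hc.2⟩

lemma pv_D_iff (ma mb : Int) (rest : List (List Int))
    (hlen : ∀ s ∈ ([ma, mb] :: rest), s.length = 2) :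
    D_solution ([ma, mb] :: rest) ↔
      ((¬ ∃ s ∈ ([ma, mb] :: rest), pvKA s > ma ∧ pvKB s > mb) ∧
       ∃ s ∈ ([ma, mb] :: rest), pvKB s < -1 ∧ pvKA s + pvKB s > ma + mb ∧
         ¬ ∃ y ∈ ([ma, mb] :: rest), pvKA y > pvKA s ∧ pvKB y > pvKB s) := by
  unfold D_solution
  rw [List.headD_cons, pv_beats_iff _ hlen [ma, mb] rfl]
  simp only [pvKA_pair, pvKB_pair]
  constructor
  · rintro ⟨h1, s, hs, hlt, hsum, hnb⟩
    obtain ⟨a, b, rfl⟩ := pv_len2 (hlen s hs)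
    rw [pv_beats_iff _ hlen _ (hlen _ hs)] at hnb
    rw [pv_getD1] at hlt
    refine ⟨h1, [a, b], hs, by rw [pvKB_pair]; exact hlt, ?_, hnb⟩
    rw [pvKA_pair, pvKB_pair]
    simpa using hsum
  · rintro ⟨h1, s, hs, hlt, hsum, hnb⟩
    obtain ⟨a, b, rfl⟩ := pv_len2 (hlen s hs)
    rw [pvKB_pair] at hlt
    rw [pvKA_pair, pvKB_pair] at hsum
    exact ⟨h1, [a, b], hs, by rw [pv_getD1]; exact hlt, by simpa using hsum,
      by rw [pv_beats_iff _ hlen _ (hlen _ hs)]; exact hnb⟩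

lemma pv_spec_main : ∀ (scores : List (List Int)),
    (scores ≠ [] ∧ ∀ s ∈ scores, s.length = 2) →
    (¬ D_solution scores → solution scores = solution_alt scores) := by
  intro scores hpre hnD
  obtain ⟨hne, hlen⟩ := hpre
  cases scores with
  | nil => exact absurd rfl hne
  | cons s0 rest =>
    obtain ⟨ma, mb, rfl⟩ := pv_len2 (hlen s0 List.mem_cons_self)
    rw [pv_D_iff ma mb rest hlen] at hnD
    by_cases hd : ∃ s ∈ ([ma, mb] :: rest), pvKA s > ma ∧ pvKB s > mb
    · obtain ⟨h1, h2⟩ := pv_neg ma mb rest hlen hd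
      rw [h1, h2]
    · have hnC4 : ¬ ∃ s ∈ ([ma, mb] :: rest), pvKB s < -1 ∧ pvKA s + pvKB s > ma + mb ∧
          ¬ ∃ y ∈ ([ma, mb] :: rest), pvKA y > pvKA s ∧ pvKB y > pvKB s :=
        fun hC4 => hnD ⟨hd, hC4⟩
      obtain ⟨hA, hB⟩ := pv_main ma mb rest hlen hd
      rw [hA, hB]
      set L := PySem.List.sorted (PySem.List.sorted ([ma, mb] :: rest) pvKB) pvKA true with hL
      have hLmem : ∀ s, s ∈ L ↔ s ∈ ([ma, mb] :: rest) := by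
        intro s; rw [hL, PySem.List.mem_sorted, PySem.List.mem_sorted]
      have hc : L.countP (fun s => decide (pvKA s + pvKB s > ma + mb) && decide ((-1 : Int) ≤ pvKB s) && pvUndom L s)
          = L.countP (fun s => decide (pvKA s + pvKB s > ma + mb) && pvUndom L s) := by
        apply List.countP_congr
        intro s hs
        simp only [Bool.and_eq_true, decide_eq_true_eq]
        constructor
        · rintro ⟨⟨h1, _⟩, h3⟩; exact ⟨h1, h3⟩
        · rintro ⟨h1, h3⟩
          refine ⟨⟨h1, ?_⟩, h3⟩
          by_contra hlt
          apply hnC4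
          refine ⟨s, (hLmem s).mp hs, by omega, h1, ?_⟩
          intro ⟨y, hy, hy1, hy2⟩
          exact (pvUndom_iff L s).mp h3 ⟨y, (hLmem y).mpr hy, hy1, hy2⟩
      rw [hc]

lemma pv_tight_main : ∀ (scores : List (List Int)),
    (scores ≠ [] ∧ ∀ s ∈ scores, s.length = 2) →
    D_solution scores → solution scores ≠ solution_alt scores := by
  intro scores hpre hD
  obtain ⟨hne, hlen⟩ := hpre
  cases scores with
  | nil => exact absurd rfl hne
  | cons s0 rest =>
    obtain ⟨ma, mb, rfl⟩ := pv_len2 (hlen s0 List.mem_cons_self)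
    rw [pv_D_iff ma mb rest hlen] at hD
    obtain ⟨hd, s, hsmem, hs1, hs2, hs3⟩ := hD
    obtain ⟨hA, hB⟩ := pv_main ma mb rest hlen hd
    rw [hA, hB]
    set L := PySem.List.sorted (PySem.List.sorted ([ma, mb] :: rest) pvKB) pvKA true with hL
    have hLmem : ∀ t, t ∈ L ↔ t ∈ ([ma, mb] :: rest) := by
      intro t; rw [hL, PySem.List.mem_sorted, PySem.List.mem_sorted]
    have hundom : pvUndom L s = true := by
      rw [pvUndom_iff]
      intro ⟨y, hy, hy1, hy2⟩
      exact hs3 ⟨y, (hLmem y).mp hy, hy1, hy2⟩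
    have hlt : L.countP (fun t => decide (pvKA t + pvKB t > ma + mb) && decide ((-1 : Int) ≤ pvKB t) && pvUndom L t)
        < L.countP (fun t => decide (pvKA t + pvKB t > ma + mb) && pvUndom L t) := by
      apply pv_countP_lt _ _ L ?_ s ((hLmem s).mpr hsmem) ?_ ?_
      · intro t ht h
        simp only [Bool.and_eq_true, decide_eq_true_eq] at h ⊢
        exact ⟨h.1.1, h.2⟩
      · simp only [Bool.and_eq_false_iff, decide_eq_false_iff_not, not_le]
        left; right; omega
      · simp only [Bool.and_eq_true, decide_eq_true_eq]
        exact ⟨hs2, hundom⟩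
    intro heq
    omega

-- ===== VERDICT (by name: the statement is the Claim_ definition above) =====
theorem solution_spec : Claim_unchanged_solution := by
  intro scores _ hpre hnD
  exact pv_spec_main scores hpre hnD

theorem solution_changed : Claim_changed_solution := by
  unfold Claim_changed_solution; decide

theorem solution_tight : Claim_exact_solution := by
  intro scores _ hpre hD
  exact pv_tight_main scores hpre hD
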